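-- pv_equiv track=rewrite | github.com/HenriqueHartmann/Exerc-cios-Python | prg2-revisão-exe3-Henrique_Luiz_Hartmann.py | abrevia_nome
-- ===== SOURCE A (Python) =====
-- def abrevia_nome(nome_completo):
--     nomes = nome_completo.split(" ")
--     count = len(nomes)
--     for i,nome in enumerate(nomes):
--         if len(nome) <= 3:
--             nomes[i] = ''
--         elif i != 0 and i != (count -1):
--             nomes[i] = nome[0]
--     nomes = filter(None, nomes)
--     return " ".join(nomes)
-- ===== SOURCE B (Python) =====
-- def abrevia_nome(nome_completo):
--     # Streaming one-pass with one-word lookahead: a word's role (middle vs last)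
--     # is decided only when the next word arrives; no indices, no filter pass.
--     words = iter(nome_completo.split(" "))
--     pending = next(words)  # split(" ") always yields at least one token
--     out = []
--     is_first = True
--     for w in words:
--         if len(pending) > 3:
--             out.append(pending if is_first else pending[0])
--         is_first = False
--         pending = w
--     if len(pending) > 3:  # pending is now the last (possibly only) word
--         out.append(pending)
--     return " ".join(out)
-- ===== Notes on version B (the rewrite author's own statement) =====
-- stated objective: alternative
-- what changed: A's indexed loop mutating the list in place with first/last index tests plus a final filter pass is replaced by a streaming one-pass fold with one-word lookahead: each word's role (first/middle/last) is decided only when its successor arrives, kept parts are appended directly, so there are no indices, no in-place writes and no filter pass.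
import Mathlib
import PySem

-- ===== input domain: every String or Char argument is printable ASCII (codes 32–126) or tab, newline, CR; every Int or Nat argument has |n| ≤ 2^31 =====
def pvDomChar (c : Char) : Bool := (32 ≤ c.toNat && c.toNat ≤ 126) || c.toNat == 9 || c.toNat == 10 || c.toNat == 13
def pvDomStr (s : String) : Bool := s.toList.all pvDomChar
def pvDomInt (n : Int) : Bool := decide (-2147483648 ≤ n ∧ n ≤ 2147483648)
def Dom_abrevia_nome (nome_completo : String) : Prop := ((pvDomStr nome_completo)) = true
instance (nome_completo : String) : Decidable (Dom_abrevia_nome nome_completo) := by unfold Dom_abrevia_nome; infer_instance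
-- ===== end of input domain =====

-- B replaces A's indexed in-place loop + filter by a streaming one-pass with one-word
-- lookahead (a word's role is decided when its successor arrives); 'alternative', no speed claim.

-- ===== PORT A =====
-- literal port of A: split on " ", indexed loop mutating the list in place, filter truthy, join
def abrevia_nome (nome_completo : String) : String :=
  let nomes : List (List Char) := PySem.Chars.splitOn nome_completo.toList [' ']
  let count : Int := (nomes.length : Int)
  let nomes2 := (PySem.List.enumerate nomes).foldl
    (fun acc p =>
      if PySem.Chars.len p.2 ≤ 3 then PySem.List.pySetD acc p.1 []
      else if p.1 ≠ 0 ∧ p.1 ≠ count - 1 then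
        -- nome[0]: guarded by len(nome) > 3, so the default of pyGetD is never used
        PySem.List.pySetD acc p.1 [PySem.List.pyGetD p.2 0 ' ']
      else acc) nomes
  String.ofList (PySem.Chars.join [' '] (nomes2.filter (fun w => !w.isEmpty)))

-- ===== PORT B =====
-- literal port of Source B: pending word + is_first flag threaded through a fold over the
-- remaining words; the final pending word is flushed as the last word.
def abrevia_nome_alt (nome_completo : String) : String :=
  let nomes : List (List Char) := PySem.Chars.splitOn nome_completo.toList [' ']
  -- pending = next(words): split(" ") never returns [], so the default is never used
  let pending0 : List Char := nomes.headD []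
  let st : List (List Char) × Bool × List Char :=
      nomes.tail.foldl (fun st w =>
        ((if 3 < PySem.Chars.len st.2.2 then
            st.1 ++ [if st.2.1 then st.2.2 else [PySem.List.pyGetD st.2.2 0 ' ']]
          else st.1), false, w)) ([], true, pending0)
  let out := if 3 < PySem.Chars.len st.2.2 then st.1 ++ [st.2.2] else st.1
  String.ofList (PySem.Chars.join [' '] out)

-- ===== PRECONDITION & SPEC =====
def Spec_abrevia_nome (nome_completo : String) (out : String) : Prop := out = abrevia_nome_alt nome_completo
instance (nome_completo : String) (out : String) : Decidable (Spec_abrevia_nome nome_completo out) := by unfold Spec_abrevia_nome; infer_instance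

-- ===== CLAIM (what is proved, stated in full; the proofs are below) =====
def Claim_equal_abrevia_nome : Prop := ∀ (nome_completo : String), Dom_abrevia_nome nome_completo → Spec_abrevia_nome nome_completo (abrevia_nome nome_completo)

-- ===== LEMMAS AND PROOFS =====

-- A's per-index transformation
def pvT (count i : Int) (w : List Char) : List Char :=
  if PySem.Chars.len w ≤ 3 then []
  else if i ≠ 0 ∧ i ≠ count - 1 then [PySem.List.pyGetD w 0 ' ']
  else w

-- what B emits for a middle word
def pvEmit (w : List Char) : List (List Char) :=
  if 3 < PySem.Chars.len w then [[PySem.List.pyGetD w 0 ' ']] else []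

lemma pv_go_ne_nil (sep : List Char) (fuel : Nat) (l cur : List Char) (acc : List (List Char)) :
    PySem.Chars.splitOn.go sep fuel l cur acc ≠ [] := by
  induction fuel generalizing l cur acc with
  | zero => simp [PySem.Chars.splitOn.go]
  | succ n ih =>
    cases l with
    | nil => simp [PySem.Chars.splitOn.go]
    | cons c rest =>
      rw [PySem.Chars.splitOn.go]
      split
      · exact ih _ _ _
      · exact ih _ _ _

lemma pv_splitOn_ne_nil (s sep : List Char) : PySem.Chars.splitOn s sep ≠ [] :=
  pv_go_ne_nil sep _ s [] []

lemma pv_set_append {α : Type} (pre : List α) (x : α) (xs : List α) (v : α) :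
    (pre ++ x :: xs).set pre.length v = pre ++ v :: xs := by
  induction pre with
  | nil => rfl
  | cons a t ih => simp [ih]

-- A's loop rewrites each index i to pvT count i (the i-th element), left to right
lemma pv_loop_eq (count : Int) (xs pre : List (List Char)) :
    (PySem.List.enumerate xs ((pre.length : Int))).foldl
      (fun acc p =>
        if PySem.Chars.len p.2 ≤ 3 then PySem.List.pySetD acc p.1 []
        else if p.1 ≠ 0 ∧ p.1 ≠ count - 1 then
          PySem.List.pySetD acc p.1 [PySem.List.pyGetD p.2 0 ' ']
        else acc) (pre ++ xs)
    = pre ++ (PySem.List.enumerate xs ((pre.length : Int))).map (fun p => pvT count p.1 p.2) := by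
  induction xs generalizing pre with
  | nil => simp [PySem.List.enumerate]
  | cons x t ih =>
    rw [PySem.List.enumerate_cons]
    have hstep :
        (fun acc (p : Int × List Char) =>
          if PySem.Chars.len p.2 ≤ 3 then PySem.List.pySetD acc p.1 []
          else if p.1 ≠ 0 ∧ p.1 ≠ count - 1 then
            PySem.List.pySetD acc p.1 [PySem.List.pyGetD p.2 0 ' ']
          else acc) (pre ++ x :: t) ((pre.length : Int), x)
        = (pre ++ [pvT count (pre.length : Int) x]) ++ t := by
      simp only [pvT]
      split
      · rw [PySem.List.pySetD_natCast, pv_set_append]; simp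
      · split
        · rw [PySem.List.pySetD_natCast, pv_set_append]; simp
        · simp
    rw [List.foldl_cons]
    rw [show (if PySem.Chars.len ((pre.length : Int), x).2 ≤ 3 then
          PySem.List.pySetD (pre ++ x :: t) ((pre.length : Int), x).1 []
        else if ((pre.length : Int), x).1 ≠ 0 ∧ ((pre.length : Int), x).1 ≠ count - 1 then
          PySem.List.pySetD (pre ++ x :: t) ((pre.length : Int), x).1
            [PySem.List.pyGetD ((pre.length : Int), x).2 0 ' ']
        else pre ++ x :: t) = (pre ++ [pvT count (pre.length : Int) x]) ++ t from hstep]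
    have hlen : ((pre.length : Int)) + 1 = (((pre ++ [pvT count (pre.length : Int) x]).length : Int)) := by
      simp
    rw [hlen, ih]
    simp

lemma pv_mid_eq (count : Int) (ms : List (List Char)) (s : Int)
    (h1 : 1 ≤ s) (h2 : s + (ms.length : Int) ≤ count - 1) :
    (PySem.List.enumerate ms s).map (fun p => pvT count p.1 p.2)
    = ms.map (fun w => if 3 < PySem.Chars.len w then [PySem.List.pyGetD w 0 ' '] else []) := by
  induction ms generalizing s with
  | nil => simp [PySem.List.enumerate]
  | cons w t ih =>
    rw [PySem.List.enumerate_cons]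
    simp only [List.map_cons]
    congr 1
    · unfold pvT
      have hs0 : s ≠ 0 := by omega
      have hsc : s ≠ count - 1 := by
        simp only [List.length_cons] at h2; push_cast at h2; omega
      by_cases hle : PySem.Chars.len w ≤ 3
      · rw [if_pos hle, if_neg (by omega : ¬ 3 < PySem.Chars.len w)]
      · rw [if_neg hle, if_pos (show s ≠ 0 ∧ s ≠ count - 1 from ⟨hs0, hsc⟩),
            if_pos (by omega : 3 < PySem.Chars.len w)]
    · apply ih
      · omega
      · simp only [List.length_cons] at h2; push_cast at h2 ⊢; omega

lemma pv_keep_first (count : Int) (w : List Char) :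
    pvT count 0 w = if 3 < PySem.Chars.len w then w else [] := by
  unfold pvT
  by_cases h : PySem.Chars.len w ≤ 3
  · rw [if_pos h, if_neg (by omega)]
  · rw [if_neg h, if_neg (by simp), if_pos (by omega)]

lemma pv_keep_last (count : Int) (w : List Char) :
    pvT count (count - 1) w = if 3 < PySem.Chars.len w then w else [] := by
  unfold pvT
  by_cases h : PySem.Chars.len w ≤ 3
  · rw [if_pos h, if_neg (by omega)]
  · rw [if_neg h, if_neg (by simp), if_pos (by omega)]

-- filtering the abbreviated middles equals flat-mapping pvEmit
lemma pv_filter_mid (ms : List (List Char)) :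
    (ms.map (fun w => if 3 < PySem.Chars.len w then [PySem.List.pyGetD w 0 ' '] else [])).filter
      (fun w => !w.isEmpty)
    = ms.flatMap pvEmit := by
  induction ms with
  | nil => rfl
  | cons w t ih =>
    simp only [List.map_cons, List.flatMap_cons, pvEmit]
    by_cases h : 3 < PySem.Chars.len w
    · rw [if_pos h, if_pos h, List.filter_cons_of_pos (by simp), ih]; rfl
    · rw [if_neg h, if_neg h, List.filter_cons_of_neg (by simp), ih]; rfl

-- B's fold invariant after the first word has been consumed (is_first = false)
lemma pv_foldB (l : List (List Char)) (out : List (List Char)) (p : List Char) :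
    l.foldl (fun st w =>
        ((if 3 < PySem.Chars.len st.2.2 then
            st.1 ++ [if st.2.1 then st.2.2 else [PySem.List.pyGetD st.2.2 0 ' ']]
          else st.1), false, w))
      ((out, false, p) : List (List Char) × Bool × List Char)
    = (out ++ ((p :: l).dropLast).flatMap pvEmit, false, l.getLastD p) := by
  induction l generalizing out p with
  | nil => simp
  | cons w t ih =>
    rw [List.foldl_cons]
    have hstep : ((if 3 < PySem.Chars.len p then
          out ++ [if false = true then p else [PySem.List.pyGetD p 0 ' ']] else out), false, w)
        = ((out ++ pvEmit p, false, w) : List (List Char) × Bool × List Char) := by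
      simp only [pvEmit, PySem.Chars.len]
      by_cases h : 3 < ((p.length : Int))
      · simp [h]
      · simp [h]
    simp only [Bool.false_eq_true, if_false] at hstep ⊢
    rw [hstep, ih]
    refine Prod.ext ?_ (Prod.ext rfl ?_)
    · simp
    · cases t <;> simp [List.getLastD]

-- B's full loop on at least two words: flush the first word full, then pv_foldB
lemma pv_foldB_first (t : List (List Char)) (h r : List Char) :
    (r :: t).foldl (fun st w =>
        ((if 3 < PySem.Chars.len st.2.2 then
            st.1 ++ [if st.2.1 then st.2.2 else [PySem.List.pyGetD st.2.2 0 ' ']]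
          else st.1), false, w))
      (([], true, h) : List (List Char) × Bool × List Char)
    = ((if 3 < PySem.Chars.len h then [h] else []) ++ ((r :: t).dropLast).flatMap pvEmit,
        false, t.getLastD r) := by
  rw [List.foldl_cons]
  exact pv_foldB t (if 3 < PySem.Chars.len h then [h] else []) r

-- ===== VERDICT (by name: the statement is the Claim_ definition above) =====
theorem abrevia_nome_spec : Claim_equal_abrevia_nome := by
  intro s _
  simp only [Spec_abrevia_nome, abrevia_nome, abrevia_nome_alt]
  obtain ⟨h, rest, hcons⟩ := List.exists_cons_of_ne_nil (pv_splitOn_ne_nil s.toList [' '])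
  rw [hcons]
  have hA := pv_loop_eq (((h :: rest).length : Int)) (h :: rest) []
  simp only [List.length_nil, Nat.cast_zero, List.nil_append] at hA
  rw [hA]
  clear hA
  cases rest with
  | nil =>
    -- single token: A keeps it iff len > 3; B's loop does not run and flushes pending
    by_cases hk : 3 < ((h.length : Int))
    · have hne : h ≠ [] := by cases h <;> simp_all
      simp [PySem.List.enumerate, pv_keep_first, PySem.Chars.len, hk, hne]
    · simp [PySem.List.enumerate, pv_keep_first, PySem.Chars.len, hk]
  | cons r t =>
    -- B side: first step flushes h (is_first = true), then pv_foldB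
    simp only [List.headD_cons, List.tail_cons]
    rw [pv_foldB_first]
    -- A side: decompose r :: t = ms ++ [lastw]
    have hdecomp : ∀ (a : List Char) (l : List (List Char)),
        a :: l = (a :: l).dropLast ++ [l.getLastD a] := by
      intro a l
      induction l generalizing a with
      | nil => rfl
      | cons b m ihl =>
        rw [List.getLastD_cons, List.dropLast_cons₂, List.cons_append]
        exact congrArg (List.cons a) (ihl b)
    set ms := (r :: t).dropLast with hms
    set lastw := t.getLastD r with hlw
    have hsplit : r :: t = ms ++ [lastw] := hdecomp r t
    rw [show PySem.List.enumerate (h :: r :: t) 0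
        = PySem.List.enumerate (h :: (ms ++ [lastw])) 0 from by rw [← hsplit]]
    have hEnum : PySem.List.enumerate (h :: (ms ++ [lastw])) 0
        = (0, h) :: (PySem.List.enumerate ms 1 ++ [(1 + (ms.length : Int), lastw)]) := by
      rw [PySem.List.enumerate_cons, PySem.List.enumerate_append]
      simp [PySem.List.enumerate]
    rw [hEnum]
    simp only [List.map_cons, List.map_append, List.map_nil]
    have hcount : (((h :: r :: t).length : Int)) = (ms.length : Int) + 2 := by
      have : (r :: t).length = ms.length + 1 := by rw [hsplit]; simp
      simp [this]; ring
    rw [hcount]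
    rw [pv_keep_first]
    rw [show (1 + (ms.length : Int)) = ((ms.length : Int) + 2) - 1 from by ring, pv_keep_last]
    rw [pv_mid_eq ((ms.length : Int) + 2) ms 1 (by omega) (by omega)]
    -- now both sides are joins of explicitly filtered / emitted pieces
    rw [List.filter_cons, List.filter_append, pv_filter_mid, List.filter_cons]
    have hne : ∀ w : List Char, 3 < ((w.length : Int)) → w ≠ [] := by
      intro w hw e; subst e; simp at hw
    by_cases hk : 3 < ((h.length : Int)) <;> by_cases hl : 3 < ((lastw.length : Int))
    · simp [PySem.Chars.len, hk, hl, hne h hk, hne lastw hl]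
    · simp [PySem.Chars.len, hk, hl, hne h hk]
    · simp [PySem.Chars.len, hk, hl, hne lastw hl]
    · simp [PySem.Chars.len, hk, hl]
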